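-- pv_equiv track=rewrite | github.com/d781/WYROWNANIE_SWOBODNE | funkcje.py | macierzA
-- ===== SOURCE A (Python) =====
-- def macierzA(A,obs,opis):
--     for obserwacja in obs:
--         tmp = [0 for i in opis]
--         for i, ind in enumerate(opis):
--             for ob in obserwacja:
--                 if ob[0] == ind:
--                     tmp[i] = ob[1]
--         A.append(tmp)
--     return A
-- ===== SOURCE B (Python) =====
-- def macierzA(A, obs, opis):
--     # Inverted index built once: opis value -> all positions where it occurs.
--     pos = {}
--     for i, ind in enumerate(opis):
--         pos.setdefault(ind, []).append(i)
--     n = len(opis)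
--     for obserwacja in obs:
--         tmp = [0] * n
--         for ob in obserwacja:
--             for i in pos.get(ob[0], ()):
--                 tmp[i] = ob[1]
--         A.append(tmp)
--     return A
-- ===== Notes on version B (the rewrite author's own statement) =====
-- stated objective: faster
-- what changed: B inverts the traversal: instead of gathering a value for each opis column by rescanning the observation, it builds an inverted index opis-value->positions once and scatters each observation entry directly into its row positions (later entries overwrite, matching A's last-match-wins).
import Mathlib
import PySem

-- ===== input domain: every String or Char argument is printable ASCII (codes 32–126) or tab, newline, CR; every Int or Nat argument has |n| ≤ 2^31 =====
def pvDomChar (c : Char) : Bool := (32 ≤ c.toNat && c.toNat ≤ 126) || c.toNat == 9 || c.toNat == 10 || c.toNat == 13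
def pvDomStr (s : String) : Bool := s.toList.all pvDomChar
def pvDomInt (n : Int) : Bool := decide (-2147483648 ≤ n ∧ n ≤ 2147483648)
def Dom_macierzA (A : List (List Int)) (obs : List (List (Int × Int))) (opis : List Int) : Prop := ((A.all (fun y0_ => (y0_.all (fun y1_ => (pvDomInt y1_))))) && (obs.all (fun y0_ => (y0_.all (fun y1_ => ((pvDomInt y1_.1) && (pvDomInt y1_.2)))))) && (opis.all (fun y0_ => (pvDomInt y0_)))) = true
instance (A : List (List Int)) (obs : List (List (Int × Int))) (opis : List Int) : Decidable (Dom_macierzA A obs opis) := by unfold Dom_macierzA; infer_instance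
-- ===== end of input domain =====

-- B inverts the traversal: one inverted index opis-value -> positions built up front, then each
-- observation entry is scattered into its row positions (gather per column -> scatter per entry).
-- Note: Python A mutates its argument A in place (append); Python B performs the same mutation,
-- and the equivalence proved here is about the return value.

-- ===== PORT A =====
-- row: tmp = [0 for i in opis]; for i, ind in enumerate(opis): for ob in obserwacja: if ob[0]==ind: tmp[i]=ob[1]
def pvRowA (opis : List Int) (obserwacja : List (Int × Int)) : List Int :=
  (PySem.List.enumerate opis).foldl
    (fun tmp p =>
      obserwacja.foldl (fun t ob => if ob.1 == p.2 then t.set p.1.toNat ob.2 else t) tmp)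
    (opis.map fun _ => 0)

def macierzA (A : List (List Int)) (obs : List (List (Int × Int))) (opis : List Int) : List (List Int) :=
  obs.foldl (fun acc obserwacja => acc ++ [pvRowA opis obserwacja]) A

-- ===== PORT B =====
-- pos = {}; for i, ind in enumerate(opis): pos.setdefault(ind, []).append(i)
def pvPosDict (opis : List Int) : PySem.Dict Int (List Nat) :=
  (PySem.List.enumerate opis).foldl
    (fun d p => d.insert p.2 ((d.getD p.2 []) ++ [p.1.toNat])) PySem.Dict.empty

-- tmp = [0]*n; for ob in obserwacja: for i in pos.get(ob[0], ()): tmp[i] = ob[1]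
def pvRowB (pos : PySem.Dict Int (List Nat)) (n : Nat) (obserwacja : List (Int × Int)) : List Int :=
  obserwacja.foldl
    (fun tmp ob => (pos.getD ob.1 []).foldl (fun t i => t.set i ob.2) tmp)
    (List.replicate n 0)

def macierzA_alt (A : List (List Int)) (obs : List (List (Int × Int))) (opis : List Int) : List (List Int) :=
  let pos := pvPosDict opis
  let n := opis.length
  obs.foldl (fun acc obserwacja => acc ++ [pvRowB pos n obserwacja]) A

-- ===== PRECONDITION & SPEC =====
def Spec_macierzA (A : List (List Int)) (obs : List (List (Int × Int))) (opis : List Int) (out : List (List Int)) : Prop := out = macierzA_alt A obs opis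
instance (A : List (List Int)) (obs : List (List (Int × Int))) (opis : List Int) (out : List (List Int)) : Decidable (Spec_macierzA A obs opis out) := by unfold Spec_macierzA; infer_instance

-- ===== CLAIM (what is proved, stated in full; the proofs are below) =====
def Claim_equal_macierzA : Prop := ∀ (A : List (List Int)) (obs : List (List (Int × Int))) (opis : List Int), Dom_macierzA A obs opis → Spec_macierzA A obs opis (macierzA A obs opis)

-- ===== LEMMAS AND PROOFS =====

-- value at key ind after scanning obserwacja left to right, starting from v0 (last match wins)
def pvLast (obserwacja : List (Int × Int)) (ind : Int) (v0 : Int) : Int :=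
  obserwacja.foldl (fun v ob => if ob.1 == ind then ob.2 else v) v0

-- ----- A-side: pvRowA = opis.map (fun ind => pvLast obserwacja ind 0) -----

theorem pvSet_getD_self (tmp : List Int) (i : Nat) : tmp.set i (tmp.getD i 0) = tmp := by
  induction tmp generalizing i with
  | nil => rfl
  | cons x xs ih =>
    cases i with
    | zero => simp [List.getD]
    | succ n =>
      have := ih n
      simp only [List.getD_eq_getElem?_getD] at this
      simp [List.set, this]

theorem pvInner_set (obserwacja : List (Int × Int)) (ind : Int) (i : Nat) (tmp : List Int) :
    obserwacja.foldl (fun t ob => if ob.1 == ind then t.set i ob.2 else t) tmp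
      = tmp.set i (pvLast obserwacja ind (tmp.getD i 0)) := by
  induction obserwacja generalizing tmp with
  | nil =>
    simp only [List.foldl_nil, pvLast]
    exact (pvSet_getD_self tmp i).symm
  | cons ob rest ih =>
    simp only [List.foldl_cons]
    by_cases h : ob.1 = ind
    · rw [if_pos (by simp [h]), ih]
      by_cases hi : i < tmp.length
      · have h1 : (tmp.set i ob.2).getD i 0 = ob.2 := by
          simp [List.getD_eq_getElem?_getD, hi]
        rw [h1, List.set_set]
        simp [pvLast, h]
      · have hn : ∀ v : Int, tmp.set i v = tmp := fun v => List.set_eq_of_length_le (by omega)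
        simp [hn, pvLast, h]
    · rw [if_neg (by simp [h]), ih]
      simp [pvLast, h]

theorem pvEnum_fold (obserwacja : List (Int × Int)) (l : List Int) (s : Nat) (tmp : List Int)
    (hlen : tmp.length = s + l.length) (hz : ∀ j, s ≤ j → tmp.getD j 0 = 0) :
    (PySem.List.enumerate l (s : Int)).foldl
      (fun tmp p =>
        obserwacja.foldl (fun t ob => if ob.1 == p.2 then t.set p.1.toNat ob.2 else t) tmp) tmp
      = tmp.take s ++ l.map (fun ind => pvLast obserwacja ind 0) := by
  induction l generalizing s tmp with
  | nil =>
    have : tmp.length ≤ s := by simp at hlen; omega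
    simp [PySem.List.enumerate_nil, List.take_of_length_le this]
  | cons ind rest ih =>
    have hs : s < tmp.length := by rw [hlen, List.length_cons]; omega
    have hcast : ((s : Int) + 1) = ((s + 1 : Nat) : Int) := by push_cast; ring
    set v := pvLast obserwacja ind 0 with hv
    have harg : obserwacja.foldl
        (fun t ob => if ob.1 == (((s : Int), ind)).2 then t.set (((s : Int), ind)).1.toNat ob.2 else t)
        tmp = tmp.set s v := by
      rw [pvInner_set]
      show tmp.set s (pvLast obserwacja ind (tmp.getD s 0)) = tmp.set s v
      rw [hz s le_rfl]
    have hlen' : (tmp.set s v).length = (s + 1) + rest.length := by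
      rw [List.length_set, hlen, List.length_cons]; omega
    have hz' : ∀ j, s + 1 ≤ j → (tmp.set s v).getD j 0 = 0 := by
      intro j hj
      rw [List.getD_eq_getElem?_getD, List.getElem?_set_ne (by omega),
        ← List.getD_eq_getElem?_getD]
      exact hz j (by omega)
    rw [PySem.List.enumerate_cons, List.foldl_cons, harg, hcast,
      ih (s + 1) (tmp.set s v) hlen' hz']
    have htake : (tmp.set s v).take (s + 1) = tmp.take s ++ [v] := by
      rw [List.set_eq_take_append_cons_drop, if_pos hs]
      set w := tmp.take s with hw
      have hmin : w.length = s := by rw [hw, List.length_take]; omega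
      rw [List.take_append, List.take_of_length_le (le_trans (le_of_eq hmin) (Nat.le_succ s)),
        hmin]
      simp
    rw [htake]
    simp [hv]

theorem pvRowA_eq_map (opis : List Int) (obserwacja : List (Int × Int)) :
    pvRowA opis obserwacja = opis.map (fun ind => pvLast obserwacja ind 0) := by
  unfold pvRowA
  rw [show (PySem.List.enumerate opis) = PySem.List.enumerate opis ((0 : Nat) : Int) from rfl]
  rw [pvEnum_fold obserwacja opis 0 (opis.map fun _ => 0) (by simp)
    (by
      intro j _
      rw [List.getD_eq_getElem?_getD]
      rcases h : (opis.map fun _ => (0 : Int))[j]? with _ | w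
      · simp
      · rcases List.getElem?_eq_some_iff.mp h with ⟨hj, hw⟩
        simp only [List.getElem_map] at hw
        simp [hw.symm])]
  simp

-- ----- B-side: membership characterization of the inverted index -----

theorem pvPosDict_fold_mem (l : List Int) (s : Nat) (d : PySem.Dict Int (List Nat))
    (ind : Int) (j : Nat) :
    (j ∈ ((PySem.List.enumerate l (s : Int)).foldl
        (fun d p => d.insert p.2 ((d.getD p.2 []) ++ [p.1.toNat])) d).getD ind [])
      ↔ (j ∈ d.getD ind [] ∨ (s ≤ j ∧ j - s < l.length ∧ l[j - s]? = some ind)) := by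
  induction l generalizing s d with
  | nil => simp [PySem.List.enumerate_nil]
  | cons a rest ih =>
    have hcast : ((s : Int) + 1) = ((s + 1 : Nat) : Int) := by push_cast; ring
    rw [PySem.List.enumerate_cons, List.foldl_cons, hcast, ih]
    have hins : ∀ k : Int,
        ((d.insert a ((d.getD a []) ++ [(s : Int).toNat])).getD k [])
          = if k = a then (d.getD a []) ++ [s] else d.getD k [] := by
      intro k
      by_cases hk : k = a
      · subst hk; simp
      · simp [PySem.Dict.getD_insert, hk]
    rw [show ((((s : Int), a)).2) = a from rfl]
    by_cases hja : ind = a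
    · rw [hins ind, if_pos hja]
      subst hja
      simp only [List.mem_append, List.mem_singleton]
      constructor
      · rintro ((h | h) | h)
        · exact Or.inl h
        · subst h
          refine Or.inr ⟨le_rfl, by simp, by simp⟩
        · exact Or.inr ⟨by omega, by simp; omega, by
            have hj : j - s = (j - (s+1)) + 1 := by omega
            rw [hj]; simpa using h.2.2⟩
      · rintro (h | ⟨h1, h2, h3⟩)
        · exact Or.inl (Or.inl h)
        · by_cases hjs : j = s
          · exact Or.inl (Or.inr hjs)
          · refine Or.inr ⟨by omega, by simp at h2 ⊢; omega, ?_⟩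
            have hj : j - s = (j - (s+1)) + 1 := by omega
            rw [hj] at h3; simpa using h3
    · rw [hins ind, if_neg hja]
      constructor
      · rintro (h | h)
        · exact Or.inl h
        · exact Or.inr ⟨by omega, by simp; omega, by
            have hj : j - s = (j - (s+1)) + 1 := by omega
            rw [hj]; simpa using h.2.2⟩
      · rintro (h | ⟨h1, h2, h3⟩)
        · exact Or.inl h
        · by_cases hjs : j = s
          · exfalso
            subst hjs
            simp at h3
            exact hja h3.symm
          · refine Or.inr ⟨by omega, by simp at h2 ⊢; omega, ?_⟩
            have hj : j - s = (j - (s+1)) + 1 := by omega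
            rw [hj] at h3; simpa using h3

theorem pvPosDict_mem (opis : List Int) (ind : Int) (j : Nat) :
    j ∈ (pvPosDict opis).getD ind [] ↔ j < opis.length ∧ opis[j]? = some ind := by
  unfold pvPosDict
  rw [show (PySem.List.enumerate opis) = PySem.List.enumerate opis ((0 : Nat) : Int) from rfl]
  rw [pvPosDict_fold_mem]
  simp [PySem.Dict.empty, PySem.Dict.getD, PySem.Dict.get?]

-- ----- B-side: scatter folds -----

theorem pvScatter_getElem? (L : List Nat) (v : Int) (t : List Int) (j : Nat) :
    (L.foldl (fun t i => t.set i v) t)[j]?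
      = if j ∈ L ∧ j < t.length then some v else t[j]? := by
  induction L generalizing t with
  | nil => simp
  | cons i L ih =>
    rw [List.foldl_cons, ih]
    simp only [List.length_set, List.mem_cons]
    by_cases hlt : j < t.length
    · by_cases hL : j ∈ L
      · simp [hL, hlt]
      · simp only [hL, or_false, and_true, hlt]
        rw [List.getElem?_set]
        by_cases hij : i = j
        · subst hij; simp [hlt]
        · simp [hij, Ne.symm hij]
    · have h1 : (t.set i v)[j]? = none := List.getElem?_eq_none (by simp; omega)
      have h2 : t[j]? = none := List.getElem?_eq_none (by omega)
      simp [hlt]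

theorem pvScatter_length (L : List Nat) (v : Int) (t : List Int) :
    (L.foldl (fun t i => t.set i v) t).length = t.length := by
  induction L generalizing t with
  | nil => rfl
  | cons i L ih => simp [List.foldl_cons, ih]

theorem pvRowB_fold (opis : List Int) (obserwacja : List (Int × Int)) (t : List Int)
    (hlen : t.length = opis.length) (j : Nat) (hj : j < opis.length) :
    (obserwacja.foldl
        (fun tmp ob => ((pvPosDict opis).getD ob.1 []).foldl (fun t i => t.set i ob.2) tmp) t)[j]?
      = some (pvLast obserwacja (opis.getD j 0) (t.getD j 0)) := by
  induction obserwacja generalizing t with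
  | nil =>
    simp only [List.foldl_nil, pvLast, List.getD_eq_getElem?_getD]
    rw [List.getElem?_eq_getElem (by omega)]
    simp
  | cons ob rest ih =>
    rw [List.foldl_cons]
    set t' := ((pvPosDict opis).getD ob.1 []).foldl (fun t i => t.set i ob.2) t with ht'
    have hlen' : t'.length = opis.length := by rw [ht', pvScatter_length, hlen]
    rw [ih t' hlen' ]
    have hval : t'.getD j 0 = if ob.1 == opis.getD j 0 then ob.2 else t.getD j 0 := by
      rw [ht', List.getD_eq_getElem?_getD, pvScatter_getElem?]
      have hget : opis[j]? = some (opis.getD j 0) := by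
        rw [List.getD_eq_getElem?_getD, List.getElem?_eq_getElem hj]; rfl
      by_cases h : ob.1 = opis.getD j 0
      · rw [if_pos ⟨(pvPosDict_mem opis ob.1 j).mpr ⟨hj, by rw [h]; exact hget⟩, by omega⟩]
        have hb : (ob.1 == opis.getD j 0) = true := beq_iff_eq.mpr h
        rw [Option.getD_some, if_pos hb]
      · rw [if_neg (fun hc => by
          have := ((pvPosDict_mem opis ob.1 j).mp hc.1).2
          rw [hget] at this
          exact h (by injection this with h2; exact h2.symm))]
        have hb : ¬ ((ob.1 == opis.getD j 0) = true) := fun hc => h (beq_iff_eq.mp hc)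
        rw [if_neg hb, List.getD_eq_getElem?_getD]
    rw [hval]
    simp [pvLast]

theorem pvRowB_length (opis : List Int) (obserwacja : List (Int × Int)) :
    (pvRowB (pvPosDict opis) opis.length obserwacja).length = opis.length := by
  unfold pvRowB
  induction obserwacja generalizing opis with
  | nil => simp
  | cons ob rest ih =>
    rw [List.foldl_cons]
    -- reduce to a generic fold-preserves-length argument
    have : ∀ (os : List (Int × Int)) (t : List Int),
        (os.foldl (fun tmp ob => ((pvPosDict opis).getD ob.1 []).foldl (fun t i => t.set i ob.2) tmp) t).length
          = t.length := by
      intro os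
      induction os with
      | nil => intro t; rfl
      | cons o os iho => intro t; rw [List.foldl_cons, iho, pvScatter_length]
    rw [this, pvScatter_length, List.length_replicate]

theorem pvRow_eq (opis : List Int) (obserwacja : List (Int × Int)) :
    pvRowA opis obserwacja = pvRowB (pvPosDict opis) opis.length obserwacja := by
  rw [pvRowA_eq_map]
  apply List.ext_getElem?
  intro j
  by_cases hj : j < opis.length
  · rw [show (pvRowB (pvPosDict opis) opis.length obserwacja)
        = obserwacja.foldl (fun tmp ob => ((pvPosDict opis).getD ob.1 []).foldl (fun t i => t.set i ob.2) tmp)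
            (List.replicate opis.length 0) from rfl]
    rw [pvRowB_fold opis obserwacja _ (by simp) j hj]
    rw [List.getElem?_map, List.getElem?_eq_getElem hj]
    simp only [Option.map_some]
    congr 2
    · rw [List.getD_eq_getElem?_getD, List.getElem?_eq_getElem hj]; rfl
    · rw [List.getD_eq_getElem?_getD, List.getElem?_replicate, if_pos hj]; rfl
  · rw [List.getElem?_eq_none (by simpa using hj),
      List.getElem?_eq_none (by rw [pvRowB_length]; omega)]

-- ===== VERDICT (by name: the statement is the Claim_ definition above) =====
theorem macierzA_spec : Claim_equal_macierzA := by
  intro A obs opis _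
  show macierzA A obs opis = macierzA_alt A obs opis
  unfold macierzA macierzA_alt
  have : (fun (acc : List (List Int)) obserwacja => acc ++ [pvRowA opis obserwacja])
       = (fun (acc : List (List Int)) obserwacja => acc ++ [pvRowB (pvPosDict opis) opis.length obserwacja]) := by
    funext acc o; rw [pvRow_eq]
  rw [this]
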